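-- pv_equiv track=rewrite | github.com/kkeolmusae/algorithm | 프로그래머스/1/133499. 옹알이 （2）/옹알이 （2）.py | solution
-- ===== SOURCE A (Python) =====
-- def solution(babbling):
--     words = ["aya", "ye", "woo", "ma"]
--     answer = 0
--
--     for word in babbling:
--         if word in words:
--             answer += 1
--             continue
--
--         prev = ""
--         curr = ""
--         is_pass = False
--
--         for char in word:
--             curr += char
--
--             if prev == curr: # 같은 발음이 두번 연속인 경우 발음 불가한 케이스라 종료
--                 break
--
--             if curr in words:  # 발음 가능한 단어를 완성했으면
--                 prev = curr
--                 curr = ""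
--
--         if curr == "":
--             answer += 1
--
--     return answer
-- ===== SOURCE B (Python) =====
-- _WORDS = ("aya", "ye", "woo", "ma")
--
--
-- def _ok(s, prev):
--     if not s:
--         return True
--     for w in _WORDS:
--         if s.startswith(w):
--             return w != prev and _ok(s[len(w):], w)
--     return False
--
--
-- def solution(babbling):
--     return sum(1 for word in babbling if _ok(word, ""))
-- ===== Notes on version B (the rewrite author's own statement) =====
-- stated objective: alternative
-- what changed: Replaces A's char-by-char scan that accumulates a current buffer (with a break on a repeated word) by a recursive tokenizer that strips one allowed word prefix at a time, disallowing an immediate repeat, over a simple filter-count.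
import Mathlib
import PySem

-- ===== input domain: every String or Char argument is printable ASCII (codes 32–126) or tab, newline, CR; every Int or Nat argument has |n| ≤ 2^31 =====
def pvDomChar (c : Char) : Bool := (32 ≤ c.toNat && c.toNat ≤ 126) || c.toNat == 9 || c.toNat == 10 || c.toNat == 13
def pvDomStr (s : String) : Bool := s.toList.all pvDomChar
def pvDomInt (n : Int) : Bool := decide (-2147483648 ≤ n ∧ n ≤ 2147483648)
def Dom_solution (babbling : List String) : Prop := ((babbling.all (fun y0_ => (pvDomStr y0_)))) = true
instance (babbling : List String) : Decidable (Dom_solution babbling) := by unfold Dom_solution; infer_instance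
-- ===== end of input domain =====

-- B is an alternative, token-at-a-time recursive tokenizer replacing A's char-by-char
-- accumulator scan; same return value on every input, not claimed faster.

-- ===== PORT A =====
-- A's word list (characters; String comparison is done via toList, which is exact)
def wordsA : List (List Char) := [['a','y','a'], ['y','e'], ['w','o','o'], ['m','a']]

-- A's inner `for char in word` loop with its `break`: returns the final value of `curr`
def loopA : List Char → List Char → List Char → List Char
  | _, curr, [] => curr
  | prev, curr, c :: rest =>
    if prev = curr ++ [c] then curr ++ [c]          -- break with curr = curr ++ [c]
    else if curr ++ [c] ∈ wordsA then loopA (curr ++ [c]) [] rest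
    else loopA prev (curr ++ [c]) rest

def solution (babbling : List String) : Int :=
  babbling.foldl
    (fun answer word =>
      if word.toList ∈ wordsA then answer + 1
      else if loopA [] [] word.toList = [] then answer + 1 else answer)
    0

-- ===== PORT B =====
def wordsB : List (List Char) := [['a','y','a'], ['y','e'], ['w','o','o'], ['m','a']]

-- Source B's `_ok`: strip one token prefix at a time, forbidding an immediate repeat
def okB (s prev : List Char) : Bool :=
  if _h : s.isEmpty then true
  else
    match _hf : wordsB.find? (fun w => w.isPrefixOf s) with
    | none => false
    | some w => !(w == prev) && okB (s.drop w.length) w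
termination_by s.length
decreasing_by
  have hmem := List.mem_of_find?_eq_some _hf
  have hpre : w.isPrefixOf s = true := by
    have := List.find?_some _hf
    simpa using this
  have hle : w.length ≤ s.length := (List.isPrefixOf_iff_prefix.mp hpre).length_le
  have hw : 0 < w.length := by
    simp only [wordsB, List.mem_cons, List.not_mem_nil, or_false] at hmem
    rcases hmem with h|h|h|h <;> subst h <;> decide
  have hs : s ≠ [] := by simpa [List.isEmpty_iff] using _h
  have hs2 : 0 < s.length := List.length_pos_of_ne_nil hs
  simp only [List.length_drop]; omega

def solution_alt (babbling : List String) : Int :=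
  ((babbling.filter (fun word => okB word.toList [])).length : Int)

-- ===== PRECONDITION & SPEC =====
def Spec_solution (babbling : List String) (out : Int) : Prop := out = solution_alt babbling
instance (babbling : List String) (out : Int) : Decidable (Spec_solution babbling out) := by unfold Spec_solution; infer_instance

-- ===== CLAIM (what is proved, stated in full; the proofs are below) =====
def Claim_equal_solution : Prop := ∀ (babbling : List String), Dom_solution babbling → Spec_solution babbling (solution babbling)

-- ===== LEMMAS AND PROOFS =====

-- prev is always "" or a completed word
lemma prev_ne {prev : List Char} (hprev : prev = [] ∨ prev ∈ wordsA)
    (curr : List Char) (h1 : curr ≠ []) (h2 : curr ∉ wordsA) : prev ≠ curr := by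
  rcases hprev with h | h
  · subst h; exact fun hc => h1 hc.symm
  · intro hc; exact h2 (hc ▸ h)

-- if no word is a prefix of (curr ++ s), A's inner loop ends with curr ≠ ""
lemma loopA_fail : ∀ (s curr prev : List Char), curr ++ s ≠ [] →
    (∀ w ∈ wordsA, ¬ w <+: curr ++ s) → loopA prev curr s ≠ [] := by
  intro s
  induction s with
  | nil => intro curr prev hne _; simpa [loopA] using hne
  | cons c rest ih =>
    intro curr prev hne hnp
    show loopA prev curr (c :: rest) ≠ []
    rw [loopA]
    split_ifs with h1 h2
    · simp
    · exact absurd (show (curr ++ [c]) <+: curr ++ c :: rest from ⟨rest, by simp⟩) (hnp _ h2)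
    · refine ih (curr ++ [c]) prev (by simp) ?_
      intro w hw
      simpa using hnp w hw

lemma okB_nil (prev : List Char) : okB [] prev = true := by
  rw [okB]; rfl

-- one unfolding of okB on a non-empty string
lemma okB_cons (c : Char) (s prev : List Char) :
    okB (c :: s) prev =
      match wordsB.find? (fun w => w.isPrefixOf (c :: s)) with
      | none => false
      | some w => !(w == prev) && okB ((c :: s).drop w.length) w := by
  rw [okB]
  rw [dif_neg (by simp)]
  split
  · rename_i heq; rw [heq]
  · rename_i w heq; rw [heq]

lemma mem_words_ok : ∀ w ∈ wordsA, okB w [] = true := by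
  intro w hw
  simp only [wordsA, List.mem_cons, List.not_mem_nil, or_false] at hw
  rcases hw with h|h|h|h <;> subst h <;>
    rw [okB_cons] <;> simp [wordsB, List.find?, List.isPrefixOf, okB_nil]

-- the main bridge: A's inner loop ends with curr = "" iff B's tokenizer accepts
lemma main_lemma : ∀ (n : Nat) (s prev : List Char), s.length ≤ n →
    (prev = [] ∨ prev ∈ wordsA) → ((loopA prev [] s = []) ↔ okB s prev = true) := by
  intro n
  induction n with
  | zero =>
    intro s prev hlen _
    have : s = [] := List.eq_nil_of_length_eq_zero (Nat.le_zero.mp hlen)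
    subst this; simp [loopA, okB_nil]
  | succ n ih =>
    intro s prev hlen hprev
    -- helper to close all "no word is a prefix" cases
    have fail : (∀ w ∈ wordsA, ¬ w <+: s) → s ≠ [] →
        ((loopA prev [] s = []) ↔ okB s prev = true) := by
      intro hnp hs
      have hA := loopA_fail s [] prev (by simpa) (by simpa)
      have hB : wordsB.find? (fun w => w.isPrefixOf s) = none := by
        rw [List.find?_eq_none]
        intro w hw
        simp only [Bool.not_eq_true]
        rw [← Bool.not_eq_true, List.isPrefixOf_iff_prefix]
        exact hnp w hw
      rcases s with _ | ⟨c, s'⟩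
      · exact absurd rfl hs
      · rw [okB_cons, hB]; simp [hA]
    -- token-consuming step, proved uniformly for each word below
    rcases s with _ | ⟨c, s1⟩
    · simp [loopA, okB_nil]
    by_cases hca : c = 'a'
    · subst hca
      rcases s1 with _ | ⟨c2, s2⟩
      · exact fail (by decide) (by simp)
      by_cases hc2 : c2 = 'y'
      · subst hc2
        rcases s2 with _ | ⟨c3, s3⟩
        · exact fail (by decide) (by simp)
        by_cases hc3 : c3 = 'a'
        · subst hc3
          -- s = "aya" ++ s3 : A consumes aya (or breaks if prev = aya); B strips aya
          have hA : loopA prev [] ('a'::'y'::'a'::s3) =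
              if prev = ['a','y','a'] then ['a','y','a'] else loopA ['a','y','a'] [] s3 := by
            rw [loopA]; simp only [List.cons_append, List.nil_append]
            rw [if_neg (prev_ne hprev ['a'] (by simp) (by decide))]
            rw [if_neg (by decide)]
            rw [loopA]; simp only [List.cons_append, List.nil_append]
            rw [if_neg (prev_ne hprev ['a','y'] (by simp) (by decide))]
            rw [if_neg (by decide)]
            rw [loopA]; simp only [List.cons_append, List.nil_append]
            split_ifs with h1 h2
            · rfl
            · rfl
            · exact absurd (by decide) h2
          have hB : okB ('a'::'y'::'a'::s3) prev =
              (!((['a','y','a'] : List Char) == prev) && okB s3 ['a','y','a']) := by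
            rw [okB_cons]
            have : wordsB.find? (fun w => w.isPrefixOf ('a'::'y'::'a'::s3)) =
                some ['a','y','a'] := by
              simp [wordsB, List.isPrefixOf]
            rw [this]; rfl
          rw [hA, hB]
          by_cases hp : prev = ['a','y','a']
          · subst hp; simp
          · rw [if_neg hp]
            have := ih s3 ['a','y','a'] (by simp at hlen; omega) (Or.inr (by decide))
            simp [Ne.symm hp, this]
        · refine fail ?_ (by simp)
          intro w hw
          simp only [wordsA, List.mem_cons, List.not_mem_nil, or_false] at hw
          rcases hw with h|h|h|h <;> subst h <;> rintro ⟨u, hu⟩ <;> simp_all <;>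
            exact absurd hu.1.symm (by assumption)
      · refine fail ?_ (by simp)
        intro w hw
        simp only [wordsA, List.mem_cons, List.not_mem_nil, or_false] at hw
        rcases hw with h|h|h|h <;> subst h <;> rintro ⟨u, hu⟩ <;> simp_all <;>
            exact absurd hu.1.symm (by assumption)
    · by_cases hcy : c = 'y'
      · subst hcy
        rcases s1 with _ | ⟨c2, s2⟩
        · exact fail (by decide) (by simp)
        by_cases hc2 : c2 = 'e'
        · subst hc2
          have hA : loopA prev [] ('y'::'e'::s2) =
              if prev = ['y','e'] then ['y','e'] else loopA ['y','e'] [] s2 := by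
            rw [loopA]; simp only [List.cons_append, List.nil_append]
            rw [if_neg (prev_ne hprev ['y'] (by simp) (by decide))]
            rw [if_neg (by decide)]
            rw [loopA]; simp only [List.cons_append, List.nil_append]
            split_ifs with h1 h2
            · rfl
            · rfl
            · exact absurd (by decide) h2
          have hB : okB ('y'::'e'::s2) prev =
              (!((['y','e'] : List Char) == prev) && okB s2 ['y','e']) := by
            rw [okB_cons]
            have : wordsB.find? (fun w => w.isPrefixOf ('y'::'e'::s2)) =
                some ['y','e'] := by
              simp [wordsB, List.isPrefixOf]
            rw [this]; rfl
          rw [hA, hB]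
          by_cases hp : prev = ['y','e']
          · subst hp; simp
          · rw [if_neg hp]
            have := ih s2 ['y','e'] (by simp at hlen; omega) (Or.inr (by decide))
            simp [Ne.symm hp, this]
        · refine fail ?_ (by simp)
          intro w hw
          simp only [wordsA, List.mem_cons, List.not_mem_nil, or_false] at hw
          rcases hw with h|h|h|h <;> subst h <;> rintro ⟨u, hu⟩ <;> simp_all <;>
            exact absurd hu.1.symm (by assumption)
      · by_cases hcw : c = 'w'
        · subst hcw
          rcases s1 with _ | ⟨c2, s2⟩
          · exact fail (by decide) (by simp)
          by_cases hc2 : c2 = 'o'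
          · subst hc2
            rcases s2 with _ | ⟨c3, s3⟩
            · exact fail (by decide) (by simp)
            by_cases hc3 : c3 = 'o'
            · subst hc3
              have hA : loopA prev [] ('w'::'o'::'o'::s3) =
                  if prev = ['w','o','o'] then ['w','o','o'] else loopA ['w','o','o'] [] s3 := by
                rw [loopA]; simp only [List.cons_append, List.nil_append]
                rw [if_neg (prev_ne hprev ['w'] (by simp) (by decide))]
                rw [if_neg (by decide)]
                rw [loopA]; simp only [List.cons_append, List.nil_append]
                rw [if_neg (prev_ne hprev ['w','o'] (by simp) (by decide))]
                rw [if_neg (by decide)]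
                rw [loopA]; simp only [List.cons_append, List.nil_append]
                split_ifs with h1 h2
                · rfl
                · rfl
                · exact absurd (by decide) h2
              have hB : okB ('w'::'o'::'o'::s3) prev =
                  (!((['w','o','o'] : List Char) == prev) && okB s3 ['w','o','o']) := by
                rw [okB_cons]
                have : wordsB.find? (fun w => w.isPrefixOf ('w'::'o'::'o'::s3)) =
                    some ['w','o','o'] := by
                  simp [wordsB, List.isPrefixOf]
                rw [this]; rfl
              rw [hA, hB]
              by_cases hp : prev = ['w','o','o']
              · subst hp; simp
              · rw [if_neg hp]
                have := ih s3 ['w','o','o'] (by simp at hlen; omega) (Or.inr (by decide))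
                simp [Ne.symm hp, this]
            · refine fail ?_ (by simp)
              intro w hw
              simp only [wordsA, List.mem_cons, List.not_mem_nil, or_false] at hw
              rcases hw with h|h|h|h <;> subst h <;> rintro ⟨u, hu⟩ <;> simp_all <;>
            exact absurd hu.1.symm (by assumption)
          · refine fail ?_ (by simp)
            intro w hw
            simp only [wordsA, List.mem_cons, List.not_mem_nil, or_false] at hw
            rcases hw with h|h|h|h <;> subst h <;> rintro ⟨u, hu⟩ <;> simp_all <;>
            exact absurd hu.1.symm (by assumption)
        · by_cases hcm : c = 'm'
          · subst hcm
            rcases s1 with _ | ⟨c2, s2⟩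
            · exact fail (by decide) (by simp)
            by_cases hc2 : c2 = 'a'
            · subst hc2
              have hA : loopA prev [] ('m'::'a'::s2) =
                  if prev = ['m','a'] then ['m','a'] else loopA ['m','a'] [] s2 := by
                rw [loopA]; simp only [List.cons_append, List.nil_append]
                rw [if_neg (prev_ne hprev ['m'] (by simp) (by decide))]
                rw [if_neg (by decide)]
                rw [loopA]; simp only [List.cons_append, List.nil_append]
                split_ifs with h1 h2
                · rfl
                · rfl
                · exact absurd (by decide) h2
              have hB : okB ('m'::'a'::s2) prev =
                  (!((['m','a'] : List Char) == prev) && okB s2 ['m','a']) := by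
                rw [okB_cons]
                have : wordsB.find? (fun w => w.isPrefixOf ('m'::'a'::s2)) =
                    some ['m','a'] := by
                  simp [wordsB, List.isPrefixOf]
                rw [this]; rfl
              rw [hA, hB]
              by_cases hp : prev = ['m','a']
              · subst hp; simp
              · rw [if_neg hp]
                have := ih s2 ['m','a'] (by simp at hlen; omega) (Or.inr (by decide))
                simp [Ne.symm hp, this]
            · refine fail ?_ (by simp)
              intro w hw
              simp only [wordsA, List.mem_cons, List.not_mem_nil, or_false] at hw
              rcases hw with h|h|h|h <;> subst h <;> rintro ⟨u, hu⟩ <;> simp_all <;>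
            exact absurd hu.1.symm (by assumption)
          · refine fail ?_ (by simp)
            intro w hw
            simp only [wordsA, List.mem_cons, List.not_mem_nil, or_false] at hw
            rcases hw with h|h|h|h <;> subst h <;> rintro ⟨u, hu⟩ <;> simp_all <;>
            exact absurd hu.1.symm (by assumption)

-- per word: A counts it iff B's tokenizer accepts it
lemma word_eq (w : List Char) :
    ((w ∈ wordsA ∨ loopA [] [] w = []) ↔ okB w [] = true) := by
  constructor
  · rintro (h | h)
    · exact mem_words_ok w h
    · exact (main_lemma w.length w [] le_rfl (Or.inl rfl)).mp h
  · intro h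
    exact Or.inr ((main_lemma w.length w [] le_rfl (Or.inl rfl)).mpr h)

lemma fold_eq : ∀ (l : List String) (a : Int),
    l.foldl
      (fun answer word =>
        if word.toList ∈ wordsA then answer + 1
        else if loopA [] [] word.toList = [] then answer + 1 else answer)
      a = a + ((l.filter (fun word => okB word.toList [])).length : Int) := by
  intro l
  induction l with
  | nil => intro a; simp
  | cons x xs ih =>
    intro a
    simp only [List.foldl_cons, List.filter_cons]
    by_cases hx : okB x.toList [] = true
    · have hstep : (if x.toList ∈ wordsA then a + 1
          else if loopA [] [] x.toList = [] then a + 1 else a) = a + 1 := by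
        rcases (word_eq x.toList).mpr hx with h | h
        · rw [if_pos h]
        · rw [h]; simp
      rw [hstep, if_pos hx, ih]
      simp only [List.length_cons]
      push_cast; ring
    · have h2 : ¬ (x.toList ∈ wordsA ∨ loopA [] [] x.toList = []) :=
        fun hc => hx ((word_eq x.toList).mp hc)
      rw [if_neg hx, if_neg (fun h => h2 (Or.inl h)), if_neg (fun h => h2 (Or.inr h)), ih]

-- ===== VERDICT (by name: the statement is the Claim_ definition above) =====
theorem solution_spec : Claim_equal_solution := by
  intro babbling _
  show solution babbling = solution_alt babbling
  unfold solution solution_alt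
  rw [fold_eq]
  simp
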